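-- pv_equiv track=rewrite | github.com/Ayush7614/Daily-Coding-DS-ALGO-Practice | Hackerank/LuckyNumber.py | lucky_number
-- ===== SOURCE A (Python) =====
-- def getSum(n):
--     sum = 0
--     for digit in str(n):
--       sum += int(digit)
--     return sum
--
-- def getSquareSum(n):
--     SquareSum = 0
--     for digit in str(n):
--       SquareSum += int(digit)*int(digit)
--     return SquareSum
--
-- def checkPrime(number):
--     isPrime = False
--     if number == 2:
--         isPrime = True
--     if number > 2:
--         isPrime = True
--         for i in range(2, number):
--             if number % i == 0:
--                 isPrime = False
--                 break
--     return isPrime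
--
-- def lucky_number(a,b):
-- # DECLARING EMPTY LISTS
--     # List to store sum and sum of squares of digits of numbers
--     FullList=[]
--
--     # List to store final lucky numbers
--     primeList=[]
--
--     # For loop to append sum and sum of squares of digits of numbers in FullList
--     for i in range(a,b+1):
--         sumList=[getSum(i),getSquareSum(i)]
--         FullList.append(sumList)
--
--     # Declaring a counter
--     counter=0
--
--     # For loop for storing all lucky numbers into primeList
--     for i in range(a,b+1):
--         if checkPrime(FullList[counter][0]) and checkPrime(FullList[counter][1]):
--             primeList.append(i)
--         counter+=1
--
--     #return primeList
--     return primeList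
-- ===== SOURCE B (Python) =====
-- def lucky_number(a, b):
--     # Different algorithm: arithmetic divmod digit extraction (no str()),
--     # sqrt-bounded trial division (no scan up to n), and a memo dict so each
--     # distinct digit-sum value is primality-tested only once.
--     def is_prime(n):
--         if n < 2:
--             return False
--         d = 2
--         while d * d <= n:
--             if n % d == 0:
--                 return False
--             d += 1
--         return True
--
--     cache = {}
--
--     def prime(n):
--         if n not in cache:
--             cache[n] = is_prime(n)
--         return cache[n]
--
--     out = []
--     for i in range(a, b + 1):
--         s = 0
--         sq = 0
--         n = i
--         while n > 0:
--             n, d = divmod(n, 10)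
--             s += d
--             sq += d * d
--         if prime(s) and prime(sq):
--             out.append(i)
--     return out
-- ===== Notes on version B (the rewrite author's own statement) =====
-- stated objective: faster
-- what changed: Replaced A's build-table-then-rescan with string digit walks and full trial division per number by one pass with arithmetic divmod digit extraction, sqrt-bounded trial division, and a memo dict so each distinct digit-sum value is primality-tested only once.
import Mathlib
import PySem

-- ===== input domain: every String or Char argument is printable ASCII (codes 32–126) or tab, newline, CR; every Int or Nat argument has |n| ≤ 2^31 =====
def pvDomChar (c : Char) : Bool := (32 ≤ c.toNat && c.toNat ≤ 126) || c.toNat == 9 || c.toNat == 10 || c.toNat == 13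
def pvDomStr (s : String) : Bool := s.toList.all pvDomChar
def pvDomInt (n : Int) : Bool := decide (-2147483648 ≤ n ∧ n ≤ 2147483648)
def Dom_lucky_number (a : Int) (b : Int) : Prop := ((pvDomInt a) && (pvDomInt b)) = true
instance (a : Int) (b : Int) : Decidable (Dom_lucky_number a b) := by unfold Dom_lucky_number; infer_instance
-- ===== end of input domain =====

-- B replaces A's build-table-then-rescan (string digit walks, full trial division
-- per number) by one pass with arithmetic divmod digit extraction, sqrt-bounded
-- trial division and a memo dict caching primality per distinct digit-sum value
-- (objective: faster, measured in a timing run).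

-- ===== PORT A =====
-- int(digit) for a single char: exact on digit chars '0'-'9'; Pre_ excludes the
-- negative numbers whose '-' sign makes Python's int() raise ValueError.
def digitVal (c : Char) : Int := (c.toNat : Int) - 48

def getSum (n : Int) : Int :=
  (PySem.Int.toChars n).foldl (fun sum digit => sum + digitVal digit) 0

def getSquareSum (n : Int) : Int :=
  (PySem.Int.toChars n).foldl
    (fun squareSum digit => squareSum + digitVal digit * digitVal digit) 0

-- the 'for i in range(2, number)' loop with break: result is True iff no divisor found
def checkPrime (number : Int) : Bool :=
  if number > 2 then
    (PySem.List.pyRange 2 number 1).all (fun i => PySem.Int.mod number i != 0)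
  else
    number == 2

def lucky_number (a : Int) (b : Int) : List Int :=
  let FullList : List (Int × Int) :=
    (PySem.List.pyRange a (b + 1) 1).foldl
      (fun L i => L ++ [(getSum i, getSquareSum i)]) []
  let st :=
    (PySem.List.pyRange a (b + 1) 1).foldl
      (fun (st : List Int × Int) i =>
        let p := PySem.List.pyGetD FullList st.2 (0, 0)
        (if checkPrime p.1 && checkPrime p.2 then st.1 ++ [i] else st.1, st.2 + 1))
      ([], 0)
  st.1

-- ===== PORT B =====
-- 'while d * d <= n: …' of Source B's is_prime
def isPrimeTrial (n : Int) (d : Int) : Bool :=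
  if h : d * d ≤ n then
    if PySem.Int.mod n d == 0 then false else isPrimeTrial n (d + 1)
  else true
termination_by (n + 1 - d).toNat
decreasing_by
  have hdn : d ≤ n := by
    by_cases hd : d ≤ 0
    · nlinarith
    · nlinarith
  omega

def isPrimeB (n : Int) : Bool := if n < 2 then false else isPrimeTrial n 2

-- 'while n > 0: n, d = divmod(n, 10); …' of Source B
def digitSums (n : Int) (s : Int) (sq : Int) : Int × Int :=
  if h : 0 < n then
    let q := PySem.Int.floordiv n 10
    let d := PySem.Int.mod n 10
    digitSums q (s + d) (sq + d * d)
  else (s, sq)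
termination_by n.toNat
decreasing_by
  have h10 : (0:Int) < 10 := by norm_num
  rw [PySem.Int.floordiv_eq_ediv_of_pos h10]
  have h1 := Int.mul_ediv_add_emod n 10
  have h2 := Int.emod_lt_of_pos n h10
  have h3 := Int.emod_nonneg n (by norm_num : (10:Int) ≠ 0)
  omega

-- 'if n not in cache: cache[n] = is_prime(n); return cache[n]'
def primeCached (cache : PySem.Dict Int Bool) (n : Int) : Bool × PySem.Dict Int Bool :=
  let c := if cache.contains n then cache else cache.insert n (isPrimeB n)
  (c.getD n false, c)

def lucky_number_alt (a : Int) (b : Int) : List Int :=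
  ((PySem.List.pyRange a (b + 1) 1).foldl
    (fun (st : List Int × PySem.Dict Int Bool) i =>
      let ssq := digitSums i 0 0
      let r1 := primeCached st.2 ssq.1
      if r1.1 then
        let r2 := primeCached r1.2 ssq.2
        (if r2.1 then st.1 ++ [i] else st.1, r2.2)
      else (st.1, r1.2))
    ([], PySem.Dict.empty)).1

-- ===== PRECONDITION & SPEC =====
-- Pre_ excludes exactly the inputs where the range is nonempty and starts below 0:
-- there str(i) begins with '-' and int('-') raises ValueError in A.
def Pre_lucky_number (a : Int) (b : Int) : Prop := 0 ≤ a ∨ b < a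
instance (a : Int) (b : Int) : Decidable (Pre_lucky_number a b) := by
  unfold Pre_lucky_number; infer_instance
def pvWitness_lucky_number : Int × Int := (1, 50)

def Spec_lucky_number (a : Int) (b : Int) (out : List Int) : Prop := out = lucky_number_alt a b
instance (a : Int) (b : Int) (out : List Int) : Decidable (Spec_lucky_number a b out) := by unfold Spec_lucky_number; infer_instance

-- ===== CLAIM (what is proved, stated in full; the proofs are below) =====
def Claim_equal_lucky_number : Prop := ∀ (a : Int) (b : Int), Dom_lucky_number a b → Pre_lucky_number a b → Spec_lucky_number a b (lucky_number a b)
-- ===== LEMMAS AND PROOFS =====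

-- the arithmetic digit sums of a natural number, the common value of both sides
def dSum (m : Nat) : Int := ((Nat.digits 10 m).map (fun d : Nat => (d : Int))).sum
def dSqSum (m : Nat) : Int := ((Nat.digits 10 m).map (fun d : Nat => (d : Int) * (d : Int))).sum

theorem digitVal_digitChar (d : Nat) (hd : d < 10) : digitVal (Nat.digitChar d) = (d : Int) := by
  interval_cases d <;> decide

-- Nat.toDigits via Nat.digits, for positive numbers
theorem toDigitsCore_eq (f n : Nat) (ds : List Char) (hf : n < f) (hn : 0 < n) :
    Nat.toDigitsCore 10 f n ds = ((Nat.digits 10 n).map Nat.digitChar).reverse ++ ds := by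
  induction f generalizing n ds with
  | zero => omega
  | succ f ih =>
      rw [Nat.toDigitsCore]
      have hdig : Nat.digits 10 n = n % 10 :: Nat.digits 10 (n / 10) :=
        Nat.digits_def' (by norm_num) hn
      by_cases h0 : n / 10 = 0
      · simp [h0, hdig]
      · have hlt : n / 10 < n := Nat.div_lt_self hn (by norm_num)
        rw [if_neg h0, ih (n / 10) _ (by omega) (Nat.pos_of_ne_zero h0), hdig]
        simp

theorem foldl_add_g (g : Char → Int) (l : List Char) (s : Int) :
    l.foldl (fun acc c => acc + g c) s = s + (l.map g).sum := by
  induction l generalizing s with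
  | nil => simp
  | cons c l ih => simp [ih]; ring

theorem sum_digit_chars (g : Int → Int) (l : List Nat) (hl : ∀ d ∈ l, d < 10) :
    (((l.map Nat.digitChar).reverse).map (fun c => g (digitVal c))).sum
      = (l.map (fun d : Nat => g (d : Int))).sum := by
  induction l with
  | nil => simp
  | cons d l ih =>
      simp only [List.map_cons, List.reverse_cons, List.map_append, List.sum_append,
        List.map_cons, List.map_nil, List.sum_cons, List.sum_nil]
      rw [ih (fun x hx => hl x (List.mem_cons_of_mem d hx)),
        digitVal_digitChar d (hl d List.mem_cons_self)]
      ring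

-- A's string digit walks compute the arithmetic digit sums (n ≥ 0)
theorem getSum_eq (m : Nat) : getSum (m : Int) = dSum m := by
  unfold getSum dSum
  rw [foldl_add_g (fun c => digitVal c)]
  rcases Nat.eq_zero_or_pos m with h | h
  · subst h; decide
  · have : PySem.Int.toChars (m : Int) = ((Nat.digits 10 m).map Nat.digitChar).reverse ++ [] := by
      unfold PySem.Int.toChars
      rw [if_neg (by omega), Nat.toDigits]
      simpa using toDigitsCore_eq (m + 1) m [] (by omega) h
    rw [this]
    simpa using sum_digit_chars (fun d => d) (Nat.digits 10 m)
      (fun d hd => Nat.digits_lt_base (by norm_num) hd)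

theorem getSquareSum_eq (m : Nat) : getSquareSum (m : Int) = dSqSum m := by
  unfold getSquareSum dSqSum
  rw [foldl_add_g (fun c => digitVal c * digitVal c)]
  rcases Nat.eq_zero_or_pos m with h | h
  · subst h; decide
  · have : PySem.Int.toChars (m : Int) = ((Nat.digits 10 m).map Nat.digitChar).reverse ++ [] := by
      unfold PySem.Int.toChars
      rw [if_neg (by omega), Nat.toDigits]
      simpa using toDigitsCore_eq (m + 1) m [] (by omega) h
    rw [this]
    simpa using sum_digit_chars (fun d => d * d) (Nat.digits 10 m)
      (fun d hd => Nat.digits_lt_base (by norm_num) hd)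

-- B's divmod digit walk computes the same arithmetic digit sums (n ≥ 0)
theorem digitSums_eq (m : Nat) : ∀ (s sq : Int),
    digitSums (m : Int) s sq = (s + dSum m, sq + dSqSum m) := by
  induction m using Nat.strong_induction_on with
  | _ m ih =>
      intro s sq
      rw [digitSums]
      rcases Nat.eq_zero_or_pos m with h | h
      · subst h; simp [dSum, dSqSum]
      · rw [dif_pos (by exact_mod_cast h)]
        have hq : PySem.Int.floordiv (m : Int) 10 = ((m / 10 : Nat) : Int) := by
          exact_mod_cast PySem.Int.floordiv_natCast m 10
        have hd : PySem.Int.mod (m : Int) 10 = ((m % 10 : Nat) : Int) := by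
          exact_mod_cast PySem.Int.mod_natCast m 10
        simp only [hq, hd]
        rw [ih (m / 10) (Nat.div_lt_self h (by norm_num))]
        have hdig : Nat.digits 10 m = m % 10 :: Nat.digits 10 (m / 10) :=
          Nat.digits_def' (by norm_num) h
        simp [dSum, dSqSum, hdig]
        constructor <;> ring

-- sqrt-bounded trial division, characterised
theorem isPrimeTrial_iff (n : Int) : ∀ (d : Int), 0 ≤ d →
    (isPrimeTrial n d = true ↔ ∀ i, d ≤ i → i * i ≤ n → PySem.Int.mod n i ≠ 0) := by
  intro d hd
  rw [isPrimeTrial]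
  by_cases h : d * d ≤ n
  · rw [dif_pos h]
    by_cases hm : PySem.Int.mod n d == 0
    · simp only [hm, if_true]
      constructor
      · intro hF; exact absurd hF (by simp)
      · intro hall
        exact absurd (hall d le_rfl h) (by simpa using of_decide_eq_true hm)
    · rw [if_neg hm]
      rw [isPrimeTrial_iff n (d + 1) (by omega)]
      constructor
      · intro hall i hdi hii
        rcases eq_or_lt_of_le hdi with rfl | hlt
        · simpa using hm
        · exact hall i (by omega) hii
      · intro hall i hdi hii
        exact hall i (by omega) hii
  · rw [dif_neg h]
    constructor
    · intro _ i hdi hii _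
      exact h (by nlinarith)
    · intro _; rfl
termination_by d => (n + 1 - d).toNat
decreasing_by
  have hdn : d ≤ n := by nlinarith
  omega

-- the √n bound misses no divisor: for n > 2, a divisor in [2, n) exists iff one with i*i ≤ n does
theorem divisor_sqrt (n : Int) (hn : 2 < n) :
    (∀ i, 2 ≤ i → i < n → ¬ (i ∣ n)) ↔ (∀ i, 2 ≤ i → i * i ≤ n → ¬ (i ∣ n)) := by
  constructor
  · intro h i h2 hii
    exact h i h2 (by nlinarith)
  · intro h i h2 hin hdvd
    obtain ⟨j, hj⟩ := hdvd
    have hj2 : 2 ≤ j := by nlinarith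
    by_cases hii : i * i ≤ n
    · exact h i h2 hii ⟨j, hj⟩
    · have hji : j < i := by nlinarith
      exact h j hj2 (by nlinarith) ⟨i, by linarith [hj, mul_comm i j]⟩

-- A's checkPrime and B's isPrimeB agree on every integer
theorem checkPrime_eq (n : Int) : checkPrime n = isPrimeB n := by
  unfold checkPrime isPrimeB
  rcases lt_trichotomy n 2 with h | h | h
  · rw [if_neg (by omega), if_pos h]
    simp; omega
  · subst h
    rw [if_neg (by omega), if_neg (by omega), isPrimeTrial]
    norm_num
  · rw [if_pos h, if_neg (by omega)]
    rw [Bool.eq_iff_iff, List.all_eq_true, isPrimeTrial_iff n 2 (by omega)]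
    constructor
    · intro hall i h2i hii
      intro hmod
      have hin : i < n := by nlinarith
      have := hall i (by rw [PySem.List.mem_pyRange_one]; omega)
      simp [hmod] at this
    · intro hall x hx
      rw [PySem.List.mem_pyRange_one] at hx
      have h1 := (divisor_sqrt n h).mpr (fun i h2i hii hdvd =>
        hall i h2i hii ((PySem.Int.mod_eq_zero_iff_dvd n i).mpr hdvd))
      have := h1 x hx.1 hx.2
      rw [← PySem.Int.mod_eq_zero_iff_dvd] at this
      simpa using this

-- A's two-pass table scan, reduced to a direct fold (counter-indexed lookup into a tabulation)
theorem counter_scan (f : Int → Int × Int) (Q : Int × Int → Bool)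
    (L : List (Int × Int)) (xs : List Int) (n : Nat) (pl : List Int)
    (h : ∀ k, (hk : k < xs.length) → L.getD (n + k) (0, 0) = f xs[k]) :
    (xs.foldl
        (fun (st : List Int × Int) i =>
          (if Q (PySem.List.pyGetD L st.2 (0, 0)) then st.1 ++ [i] else st.1, st.2 + 1))
        (pl, (n : Int))).1
      = xs.foldl (fun pl i => if Q (f i) then pl ++ [i] else pl) pl := by
  induction xs generalizing n pl with
  | nil => rfl
  | cons x xs ih =>
      have hx : PySem.List.pyGetD L (n : Int) (0, 0) = f x := by
        rw [PySem.List.pyGetD_natCast]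
        simpa using h 0 (by simp)
      have hcast : ((n : Int) + 1) = ((n + 1 : Nat) : Int) := by push_cast; ring
      simp only [List.foldl_cons, hx, hcast]
      exact ih (n + 1) _ (fun k hk => by
        have := h (k + 1) (by simpa using Nat.succ_lt_succ hk)
        simpa [Nat.add_assoc, Nat.add_comm 1 k] using this)

theorem table_getD (f : Int → Int × Int) (xs : List Int) :
    ∀ k, (hk : k < xs.length) → (xs.map f).getD k (0, 0) = f xs[k] := by
  intro k hk
  rw [List.getD_eq_getElem _ _ (by simpa using hk)]
  simp

-- the per-number predicates of the two programs
def predA (i : Int) : Bool := checkPrime (getSum i) && checkPrime (getSquareSum i)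
def predB (i : Int) : Bool := isPrimeB (digitSums i 0 0).1 && isPrimeB (digitSums i 0 0).2

-- a cache is good when every stored value is the true primality of its key
def GoodCache (c : PySem.Dict Int Bool) : Prop :=
  ∀ k v, c.get? k = some v → v = isPrimeB k

theorem goodCache_empty : GoodCache PySem.Dict.empty := by
  intro k v h
  rw [PySem.Dict.get?_empty] at h
  exact absurd h (by simp)

theorem primeCached_good (c : PySem.Dict Int Bool) (hc : GoodCache c) (n : Int) :
    (primeCached c n).1 = isPrimeB n ∧ GoodCache (primeCached c n).2 := by
  unfold primeCached
  by_cases h : c.contains n = true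
  · simp only [h, if_true]
    refine ⟨?_, hc⟩
    rw [PySem.Dict.contains_eq_isSome_get?] at h
    obtain ⟨v, hv⟩ := Option.isSome_iff_exists.mp h
    rw [PySem.Dict.getD_eq_get?_getD, hv]
    exact hc n v hv
  · simp only [h, Bool.not_eq_true] at *
    rw [if_neg (by simp [h])]
    refine ⟨PySem.Dict.getD_insert_self _ _ _ _, ?_⟩
    intro k v hkv
    rw [PySem.Dict.get?_insert] at hkv
    by_cases hk : k = n
    · rw [if_pos hk] at hkv
      rw [hk]
      exact (Option.some_inj.mp hkv).symm
    · rw [if_neg hk] at hkv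
      exact hc k v hkv

-- the memoising fold returns exactly the plain filtered fold
theorem memo_fold (l : List Int) : ∀ (pl : List Int) (c : PySem.Dict Int Bool), GoodCache c →
    ((l.foldl
        (fun (st : List Int × PySem.Dict Int Bool) i =>
          let ssq := digitSums i 0 0
          let r1 := primeCached st.2 ssq.1
          if r1.1 then
            let r2 := primeCached r1.2 ssq.2
            (if r2.1 then st.1 ++ [i] else st.1, r2.2)
          else (st.1, r1.2))
        (pl, c)).1)
      = l.foldl (fun pl i => if predB i then pl ++ [i] else pl) pl := by
  induction l with
  | nil => intro pl c _; rfl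
  | cons x l ih =>
      intro pl c hc
      obtain ⟨h1, hg1⟩ := primeCached_good c hc (digitSums x 0 0).1
      simp only [List.foldl_cons, h1]
      by_cases hp1 : isPrimeB (digitSums x 0 0).1 = true
      · obtain ⟨h2, hg2⟩ := primeCached_good _ hg1 (digitSums x 0 0).2
        simp only [hp1, if_true, h2]
        by_cases hp2 : isPrimeB (digitSums x 0 0).2 = true
        · simp only [hp2, if_true]
          rw [ih (pl ++ [x]) _ hg2]
          have : predB x = true := by unfold predB; simp [hp1, hp2]
          simp [this]
        · simp only [hp2, Bool.false_eq_true, if_false]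
          rw [ih pl _ hg2]
          have : predB x = false := by unfold predB; simp [hp2]
          simp [this]
      · simp only [hp1, Bool.false_eq_true, if_false]
        rw [ih pl _ hg1]
        have : predB x = false := by unfold predB; simp [hp1]
        simp [this]

-- the two predicates agree on every nonnegative integer
theorem pred_eq (i : Int) (hi : 0 ≤ i) : predA i = predB i := by
  obtain ⟨m, rfl⟩ := Int.eq_ofNat_of_zero_le hi
  unfold predA predB
  rw [digitSums_eq m 0 0]
  simp only [zero_add]
  rw [getSum_eq, getSquareSum_eq, checkPrime_eq, checkPrime_eq]

-- ===== VERDICT (by name: the statement is the Claim_ definition above) =====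
theorem lucky_number_spec : Claim_equal_lucky_number := by
  intro a b _ hpre
  unfold Spec_lucky_number lucky_number lucky_number_alt
  have htab :
      (PySem.List.pyRange a (b + 1) 1).foldl
          (fun L i => L ++ [(getSum i, getSquareSum i)]) []
        = (PySem.List.pyRange a (b + 1) 1).map (fun i => (getSum i, getSquareSum i)) := by
    simpa using PySem.List.foldl_append_singleton_eq_map
      (fun i => (getSum i, getSquareSum i)) (PySem.List.pyRange a (b + 1) 1)
  simp only [htab]
  have hcs := counter_scan (fun i => (getSum i, getSquareSum i))
        (fun p => checkPrime p.1 && checkPrime p.2)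
        ((PySem.List.pyRange a (b + 1) 1).map (fun i => (getSum i, getSquareSum i)))
        (PySem.List.pyRange a (b + 1) 1) 0 []
        (fun k hk => by simpa using table_getD (fun i => (getSum i, getSquareSum i)) (PySem.List.pyRange a (b + 1) 1) k hk)
  simp only [Nat.cast_zero] at hcs
  rw [hcs]
  rw [memo_fold _ [] _ goodCache_empty]
  have hA : (PySem.List.pyRange a (b + 1) 1).foldl
      (fun pl i => if checkPrime (getSum i) && checkPrime (getSquareSum i) then pl ++ [i] else pl) []
      = (PySem.List.pyRange a (b + 1) 1).foldl
      (fun pl i => if predB i then pl ++ [i] else pl) [] := by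
    apply PySem.List.foldl_congr_mem
    intro acc x hx
    rw [PySem.List.mem_pyRange_one] at hx
    have hx0 : 0 ≤ x := by
      rcases hpre with h0 | h0
      · omega
      · exfalso
        have : PySem.List.pyRange a (b + 1) 1 = [] :=
          PySem.List.pyRange_one_eq_nil (by omega)
        omega
    have := pred_eq x hx0
    unfold predA at this
    rw [this]
  exact hA
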